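-- pv_equiv track=rewrite | github.com/adamwebster242cs/PickHacks2026-OASISProject | main.py | calculateTotalSystemCost
-- ===== SOURCE A (Python) =====
-- def getDistance(xA, yA, xB, yB):
--     return abs(xA - xB) + abs(yA - yB)
--
-- def calculateTotalSystemCost(grid, resX, resY):
--     """Sums up the 'Price' of sending water to every building from (resX, resY)."""
--     total_cost = 0
--     height = len(grid)
--     width = len(grid[0])
--
--     for y in range(height):
--         for x in range(width):
--             demand = grid[y][x]
--             if demand > 0:
--                 dist = getDistance(x, y, resX, resY)
--                 # Cost = Distance * Volume (Demand)
--                 total_cost += (dist * demand)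
--
--     return total_cost
-- ===== SOURCE B (Python) =====
-- def calculateTotalSystemCost(grid, resX, resY):
--     """Separable form: Manhattan distance splits into x- and y-axis parts, so
--     accumulate per-column and per-row positive demand and take two 1-D weighted sums."""
--     width = len(grid[0])
--     colDemand = [sum(max(row[x], 0) for row in grid) for x in range(width)]
--     rowDemand = [sum(max(d, 0) for d in row[:width]) for row in grid]
--     total = sum(c * abs(x - resX) for x, c in enumerate(colDemand))
--     total += sum(r * abs(y - resY) for y, r in enumerate(rowDemand))
--     return total
-- ===== Notes on version B (the rewrite author's own statement) =====
-- stated objective: alternative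
-- what changed: Replaces the per-cell nested scan computing distance*demand with a separable decomposition: marginal positive demand per column and per row, then two independent 1-D weighted-distance sums.
import Mathlib
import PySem

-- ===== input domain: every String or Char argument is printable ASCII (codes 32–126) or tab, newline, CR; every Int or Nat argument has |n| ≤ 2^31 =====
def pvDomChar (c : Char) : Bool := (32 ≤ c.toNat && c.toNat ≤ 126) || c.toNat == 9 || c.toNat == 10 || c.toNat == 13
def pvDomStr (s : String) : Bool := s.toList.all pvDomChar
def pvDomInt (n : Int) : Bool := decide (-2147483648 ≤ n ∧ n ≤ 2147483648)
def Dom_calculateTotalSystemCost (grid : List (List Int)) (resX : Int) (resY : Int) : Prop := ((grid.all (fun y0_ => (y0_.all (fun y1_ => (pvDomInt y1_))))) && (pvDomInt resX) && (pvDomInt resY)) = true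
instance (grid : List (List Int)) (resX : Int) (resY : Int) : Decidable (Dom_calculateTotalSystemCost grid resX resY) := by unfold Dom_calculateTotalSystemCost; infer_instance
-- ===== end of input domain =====

-- B replaces A's per-cell nested distance*demand scan with a separable decomposition
-- (per-column and per-row positive-demand marginals, then two 1-D weighted sums); same cost, alternative algorithm.

-- ===== PORT A =====
def getDistance (xA : Int) (yA : Int) (xB : Int) (yB : Int) : Int := |xA - xB| + |yA - yB|

def calculateTotalSystemCost (grid : List (List Int)) (resX : Int) (resY : Int) : Int :=
  let height : Int := grid.length
  let width : Int := grid.headI.length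
  (PySem.List.pyRange 0 height 1).foldl (fun tc y =>
    (PySem.List.pyRange 0 width 1).foldl (fun tc x =>
      let demand := PySem.List.pyGetD (PySem.List.pyGetD grid y []) x 0
      if demand > 0 then tc + getDistance x y resX resY * demand else tc) tc) 0

-- ===== PORT B =====
def calculateTotalSystemCost_alt (grid : List (List Int)) (resX : Int) (resY : Int) : Int :=
  let width := grid.headI.length
  let colDemand := (List.range width).map (fun x => (grid.map (fun row => max (row.getD x 0) 0)).sum)
  let rowDemand := grid.map (fun row => ((row.take width).map (fun d => max d 0)).sum)
  let total := ((PySem.List.enumerate colDemand 0).map (fun p => p.2 * |p.1 - resX|)).sum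
  total + ((PySem.List.enumerate rowDemand 0).map (fun p => p.2 * |p.1 - resY|)).sum

-- ===== PRECONDITION & SPEC =====
-- Pre_ excludes exactly the inputs where the Python A raises IndexError: the empty grid
-- (len(grid[0])) and grids with a row shorter than the first row (grid[y][x] out of range);
-- B raises there as well.
def Pre_calculateTotalSystemCost (grid : List (List Int)) (resX : Int) (resY : Int) : Prop :=
  grid ≠ [] ∧ ∀ r ∈ grid, grid.headI.length ≤ r.length
instance (grid : List (List Int)) (resX : Int) (resY : Int) : Decidable (Pre_calculateTotalSystemCost grid resX resY) := by unfold Pre_calculateTotalSystemCost; infer_instance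

def pvWitness_calculateTotalSystemCost : List (List Int) × Int × Int := ([[1, 2], [0, -1]], 1, 0)

def Spec_calculateTotalSystemCost (grid : List (List Int)) (resX : Int) (resY : Int) (out : Int) : Prop := out = calculateTotalSystemCost_alt grid resX resY
instance (grid : List (List Int)) (resX : Int) (resY : Int) (out : Int) : Decidable (Spec_calculateTotalSystemCost grid resX resY out) := by unfold Spec_calculateTotalSystemCost; infer_instance

-- ===== CLAIM (what is proved, stated in full; the proofs are below) =====
def Claim_equal_calculateTotalSystemCost : Prop := ∀ (grid : List (List Int)) (resX : Int) (resY : Int), Dom_calculateTotalSystemCost grid resX resY → Pre_calculateTotalSystemCost grid resX resY → Spec_calculateTotalSystemCost grid resX resY (calculateTotalSystemCost grid resX resY)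

-- ===== LEMMAS AND PROOFS =====

theorem pv_sum_map_range (n : Nat) (f : Nat → Int) :
    ((List.range n).map f).sum = ∑ i ∈ Finset.range n, f i := by
  induction n with
  | zero => simp
  | succ m ih => simp [List.range_succ, Finset.sum_range_succ, ih]

theorem pv_sum_map_eq_range {α : Type} (l : List α) (d : α) (f : α → Int) :
    (l.map f).sum = ∑ i ∈ Finset.range l.length, f (l.getD i d) := by
  induction l with
  | nil => simp
  | cons a t ih => simp [Finset.sum_range_succ', ih]; exact add_comm _ _

theorem pv_getD_map_lt {α β : Type} (l : List α) (f : α → β) (i : Nat) (h : i < l.length)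
    (d : β) (d' : α) : (l.map f).getD i d = f (l.getD i d') := by
  simp [List.getD_eq_getElem?_getD, List.getElem?_map, List.getElem?_eq_getElem h]

theorem pv_sum_enumerate_abs (l : List Int) (s c : Int) :
    ((PySem.List.enumerate l s).map (fun p => p.2 * |p.1 - c|)).sum
      = ∑ i ∈ Finset.range l.length, (l.getD i 0) * |s + (i : Int) - c| := by
  induction l generalizing s with
  | nil => simp [PySem.List.enumerate_nil]
  | cons a t ih =>
    rw [PySem.List.enumerate_cons]
    simp only [List.map_cons, List.sum_cons, ih, List.length_cons]
    rw [Finset.sum_range_succ']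
    simp only [List.getD_cons_succ, List.getD_cons_zero, Nat.cast_zero, Nat.cast_add,
      Nat.cast_one, add_zero]
    rw [add_comm]
    congr 1
    refine Finset.sum_congr rfl ?_
    intro i _
    congr 2
    ring

theorem pv_foldl_ite_add {α : Type} (l : List α) (Q : α → Prop) [DecidablePred Q]
    (g : α → Int) (tc : Int) :
    l.foldl (fun tc a => if Q a then tc + g a else tc) tc
      = tc + (l.map (fun a => if Q a then g a else 0)).sum := by
  induction l generalizing tc with
  | nil => simp
  | cons a t ih =>
    rw [List.foldl_cons, ih]
    simp only [List.map_cons, List.sum_cons]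
    split_ifs with h <;> ring

theorem pv_nested (h w : Nat) (P : Nat → Nat → Prop) [∀ y x, Decidable (P y x)]
    (g : Nat → Nat → Int) :
    (List.range h).foldl (fun tc y =>
        (List.range w).foldl (fun tc x => if P y x then tc + g y x else tc) tc) 0
      = ∑ y ∈ Finset.range h, ∑ x ∈ Finset.range w, (if P y x then g y x else 0) := by
  have step : ∀ (tc : Int) (y : Nat),
      (List.range w).foldl (fun tc x => if P y x then tc + g y x else tc) tc
        = tc + ∑ x ∈ Finset.range w, (if P y x then g y x else 0) := by
    intro tc y; rw [pv_foldl_ite_add, pv_sum_map_range]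
  induction h with
  | zero => simp
  | succ n ih =>
    rw [List.range_succ, List.foldl_append, List.foldl_cons, List.foldl_nil, step, ih,
      Finset.sum_range_succ]

theorem pv_ite_dist (d t : Int) : (if d > 0 then t * d else 0) = max d 0 * t := by
  by_cases hd : d > 0
  · rw [if_pos hd, max_eq_left hd.le, mul_comm]
  · rw [if_neg hd, max_eq_right (by omega), zero_mul]

theorem pv_sum_take (row : List Int) (w : Nat) (hw : w ≤ row.length) :
    ((row.take w).map (fun d => max d 0)).sum
      = ∑ x ∈ Finset.range w, max (row.getD x 0) 0 := by
  rw [pv_sum_map_eq_range (row.take w) 0, List.length_take, min_eq_left hw]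
  refine Finset.sum_congr rfl ?_
  intro x hx
  have hx' : x < w := Finset.mem_range.mp hx
  congr 1
  simp [List.getD_eq_getElem?_getD, hx']

-- A as a double sum of clamped demand times Manhattan distance
theorem pv_A_eq_sum (grid : List (List Int)) (resX resY : Int) :
    calculateTotalSystemCost grid resX resY
      = ∑ y ∈ Finset.range grid.length, ∑ x ∈ Finset.range grid.headI.length,
          max ((grid.getD y []).getD x 0) 0 * (|(x : Int) - resX| + |(y : Int) - resY|) := by
  unfold calculateTotalSystemCost
  dsimp only
  rw [PySem.List.pyRange_zero_nat grid.length, PySem.List.pyRange_zero_nat grid.headI.length,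
    List.foldl_map]
  simp only [List.foldl_map, PySem.List.pyGetD_natCast]
  rw [pv_nested grid.length grid.headI.length
      (fun y x => (grid.getD y []).getD x 0 > 0)
      (fun y x => getDistance x y resX resY * ((grid.getD y []).getD x 0))]
  refine Finset.sum_congr rfl ?_
  intro y _
  refine Finset.sum_congr rfl ?_
  intro x _
  rw [pv_ite_dist]
  rfl

theorem pv_getD_mem_of_lt {α : Type} {l : List α} {i : Nat} (h : i < l.length) {d : α} :
    l.getD i d ∈ l := by
  rw [List.getD_eq_getElem l d h]
  exact List.getElem_mem h

-- B as column and row marginal sums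
theorem pv_B_eq_sum (grid : List (List Int)) (resX resY : Int)
    (hpre : ∀ r ∈ grid, grid.headI.length ≤ r.length) :
    calculateTotalSystemCost_alt grid resX resY
      = (∑ x ∈ Finset.range grid.headI.length,
          (∑ y ∈ Finset.range grid.length, max ((grid.getD y []).getD x 0) 0) * |(x : Int) - resX|)
        + ∑ y ∈ Finset.range grid.length,
          (∑ x ∈ Finset.range grid.headI.length, max ((grid.getD y []).getD x 0) 0) * |(y : Int) - resY| := by
  unfold calculateTotalSystemCost_alt
  dsimp only
  rw [pv_sum_enumerate_abs, pv_sum_enumerate_abs]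
  simp only [List.length_map, List.length_range]
  congr 1
  · refine Finset.sum_congr rfl ?_
    intro x hx
    have hx' : x < grid.headI.length := Finset.mem_range.mp hx
    rw [pv_getD_map_lt _ _ x (by simpa using hx') 0 0, List.getD_eq_getElem?_getD,
      List.getElem?_range hx', Option.getD_some, pv_sum_map_eq_range grid []]
    rw [zero_add]
  · refine Finset.sum_congr rfl ?_
    intro y hy
    have hy' : y < grid.length := Finset.mem_range.mp hy
    rw [pv_getD_map_lt _ _ y hy' 0 [], zero_add]
    congr 1
    exact pv_sum_take _ _ (hpre _ (pv_getD_mem_of_lt hy'))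

-- ===== VERDICT (by name: the statement is the Claim_ definition above) =====
theorem calculateTotalSystemCost_spec : Claim_equal_calculateTotalSystemCost := by
  intro grid resX resY _ hpre
  unfold Spec_calculateTotalSystemCost
  rw [pv_A_eq_sum, pv_B_eq_sum grid resX resY hpre.2]
  simp only [mul_add, Finset.sum_add_distrib]
  congr 1
  · rw [Finset.sum_comm]
    refine Finset.sum_congr rfl ?_
    intro x _
    rw [Finset.sum_mul]
  · refine Finset.sum_congr rfl ?_
    intro y _
    rw [Finset.sum_mul]
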